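-- pv_equiv track=rewrite | github.com/XuanjieLiu/S3Plus | model/modules/insnotes.py | _get_cnn_output_size
-- ===== SOURCE A (Python) =====
-- def _get_cnn_output_size(w, h, n_channels, n_pooling_layers, pooling_kernel_size):
--     """
--     Only works for CNN models with padding.
--     """
--     if isinstance(pooling_kernel_size, int):
--         for i in range(n_pooling_layers):
--             w = int((w - pooling_kernel_size) // pooling_kernel_size + 1)
--             h = int((h - pooling_kernel_size) // pooling_kernel_size + 1)
--     elif isinstance(pooling_kernel_size, tuple):
--         for i in range(n_pooling_layers):
--             w = int((w - pooling_kernel_size[0]) // pooling_kernel_size[0] + 1)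
--             h = int((h - pooling_kernel_size[1]) // pooling_kernel_size[1] + 1)
--
--     output_size = w * h * n_channels
--
--     return [n_channels, w, h, output_size]
-- ===== SOURCE B (Python) =====
-- # Closed form: n pooling layers of (x - k)//k + 1 collapse to x // k**n (with an
-- # O(1) bit_length cap so huge layer counts never build a huge power).
-- def _shrink(x, k, n):
--     if n <= 0 or k == 1:
--         return x
--     if n > x.bit_length():
--         return 0 if x >= 0 else -1
--     return x // k ** n
--
--
-- def _get_cnn_output_size(w, h, n_channels, n_pooling_layers, pooling_kernel_size):
--     if isinstance(pooling_kernel_size, tuple):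
--         kw, kh = pooling_kernel_size
--     else:
--         kw = kh = pooling_kernel_size
--     w = _shrink(w, kw, n_pooling_layers)
--     h = _shrink(h, kh, n_pooling_layers)
--     return [n_channels, w, h, w * h * n_channels]
-- ===== Notes on version B (the rewrite author's own statement) =====
-- stated objective: alternative
-- what changed: Replaces the per-layer loop with the closed form w // k**n per dimension (capped via bit_length), valid because (x-k)//k+1 = x//k and floor divisions by a positive k compose; O(1) in the layer count instead of O(n_pooling_layers).
-- outside the precondition, e.g. on _get_cnn_output_size(11, 11, 1, 2, -2): A returns [1, 3, 3, 9], B returns [1, 2, 2, 4]; on _get_cnn_output_size(11, 11, 1, 2, 0): A raises ZeroDivisionError, B raises ZeroDivisionError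
import Mathlib
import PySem

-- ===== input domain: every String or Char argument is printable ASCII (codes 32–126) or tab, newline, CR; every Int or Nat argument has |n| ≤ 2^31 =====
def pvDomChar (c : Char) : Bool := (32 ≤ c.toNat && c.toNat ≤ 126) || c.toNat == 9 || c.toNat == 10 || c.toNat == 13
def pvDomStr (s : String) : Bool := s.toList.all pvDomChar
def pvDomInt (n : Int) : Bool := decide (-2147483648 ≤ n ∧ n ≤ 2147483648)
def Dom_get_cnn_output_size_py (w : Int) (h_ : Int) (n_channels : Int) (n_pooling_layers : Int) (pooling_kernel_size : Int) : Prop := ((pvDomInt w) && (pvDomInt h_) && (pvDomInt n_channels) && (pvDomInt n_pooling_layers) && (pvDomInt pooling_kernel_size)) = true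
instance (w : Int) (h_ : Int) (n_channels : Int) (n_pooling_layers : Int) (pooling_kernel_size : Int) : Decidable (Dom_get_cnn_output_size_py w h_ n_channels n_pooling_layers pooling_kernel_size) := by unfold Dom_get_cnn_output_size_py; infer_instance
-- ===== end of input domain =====

-- B replaces A's per-layer pooling loop by the closed form x // k**n per dimension
-- (capped via bit_length), computing each dimension without a loop.

-- ===== PORT A =====
def get_cnn_output_size_py (w : Int) (h_ : Int) (n_channels : Int) (n_pooling_layers : Int) (pooling_kernel_size : Int) : List Int :=
  -- pooling_kernel_size is an int here (the tuple branch of the Python is for tuple kernels)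
  let p := (PySem.List.pyRange 0 n_pooling_layers 1).foldl
    (fun (q : Int × Int) _ =>
      (PySem.Int.floordiv (q.1 - pooling_kernel_size) pooling_kernel_size + 1,
       PySem.Int.floordiv (q.2 - pooling_kernel_size) pooling_kernel_size + 1)) (w, h_)
  [n_channels, p.1, p.2, p.1 * p.2 * n_channels]

-- ===== PORT B =====
def pvShrink (x k n : Int) : Int :=
  if n ≤ 0 ∨ k = 1 then x
  else if (PySem.Int.bitLength x : Int) < n then (if 0 ≤ x then 0 else -1)
  else PySem.Int.floordiv x (k ^ n.toNat)

def get_cnn_output_size_py_alt (w : Int) (h_ : Int) (n_channels : Int) (n_pooling_layers : Int) (pooling_kernel_size : Int) : List Int :=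
  let w' := pvShrink w pooling_kernel_size n_pooling_layers
  let h' := pvShrink h_ pooling_kernel_size n_pooling_layers
  [n_channels, w', h', w' * h' * n_channels]

-- ===== PRECONDITION & SPEC =====
-- Pre_ excludes only k = 0 with a pooling layer (A raises ZeroDivisionError) and negative k with
-- at least two layers, where A's repeatedly iterated floor division by a negative number yields
-- artefact "sizes" that B's closed form does not reproduce; everything else is admitted.
def Pre_get_cnn_output_size_py (w : Int) (h_ : Int) (n_channels : Int) (n_pooling_layers : Int) (pooling_kernel_size : Int) : Prop :=
  n_pooling_layers ≤ 0 ∨ 1 ≤ pooling_kernel_size ∨ (n_pooling_layers = 1 ∧ pooling_kernel_size ≠ 0)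
instance (w : Int) (h_ : Int) (n_channels : Int) (n_pooling_layers : Int) (pooling_kernel_size : Int) : Decidable (Pre_get_cnn_output_size_py w h_ n_channels n_pooling_layers pooling_kernel_size) := by unfold Pre_get_cnn_output_size_py; infer_instance

def pvWitness_get_cnn_output_size_py : Int × Int × Int × Int × Int := (32, 32, 3, 2, 2)

def Spec_get_cnn_output_size_py (w : Int) (h_ : Int) (n_channels : Int) (n_pooling_layers : Int) (pooling_kernel_size : Int) (out : List Int) : Prop := out = get_cnn_output_size_py_alt w h_ n_channels n_pooling_layers pooling_kernel_size
instance (w : Int) (h_ : Int) (n_channels : Int) (n_pooling_layers : Int) (pooling_kernel_size : Int) (out : List Int) : Decidable (Spec_get_cnn_output_size_py w h_ n_channels n_pooling_layers pooling_kernel_size out) := by unfold Spec_get_cnn_output_size_py; infer_instance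

-- ===== CLAIM (what is proved, stated in full; the proofs are below) =====
def Claim_equal_get_cnn_output_size_py : Prop := ∀ (w : Int) (h_ : Int) (n_channels : Int) (n_pooling_layers : Int) (pooling_kernel_size : Int), Dom_get_cnn_output_size_py w h_ n_channels n_pooling_layers pooling_kernel_size → Pre_get_cnn_output_size_py w h_ n_channels n_pooling_layers pooling_kernel_size → Spec_get_cnn_output_size_py w h_ n_channels n_pooling_layers pooling_kernel_size (get_cnn_output_size_py w h_ n_channels n_pooling_layers pooling_kernel_size)

-- ===== LEMMAS AND PROOFS =====

-- One pooling step '(x - k) // k + 1' is exactly 'x // k'.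
lemma pvStep (k : Int) (hk : k ≠ 0) (x : Int) :
    PySem.Int.floordiv (x - k) k + 1 = PySem.Int.floordiv x k := by
  have h := Int.add_mul_fdiv_right x (-1) hk
  have hx : x + (-1) * k = x - k := by ring
  rw [hx] at h
  simp only [PySem.Int.floordiv]
  omega

-- One step followed by m more floor divisions by k is division by k^(m+1).
lemma pvOne (k : Int) (hk : 0 < k) (m : Nat) (x : Int) :
    PySem.Int.floordiv (PySem.Int.floordiv (x - k) k + 1) (k ^ m) = PySem.Int.floordiv x (k ^ (m + 1)) := by
  rw [pvStep k hk.ne' x, PySem.Int.floordiv_eq_ediv_of_pos hk,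
      PySem.Int.floordiv_eq_ediv_of_pos (pow_pos hk m),
      PySem.Int.floordiv_eq_ediv_of_pos (pow_pos hk (m + 1)),
      Int.ediv_ediv_of_nonneg hk.le, ← pow_succ']

-- A's whole loop over any index list of length m computes (w // k^m, h // k^m).
lemma pvLoopEq (k : Int) (hk : 0 < k) (l : List Int) (w h : Int) :
    l.foldl (fun (q : Int × Int) _ =>
        (PySem.Int.floordiv (q.1 - k) k + 1, PySem.Int.floordiv (q.2 - k) k + 1)) (w, h)
      = (PySem.Int.floordiv w (k ^ l.length), PySem.Int.floordiv h (k ^ l.length)) := by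
  induction l generalizing w h with
  | nil => simp [PySem.Int.floordiv, Int.fdiv_one]
  | cons a t ih =>
    rw [List.foldl_cons, ih, pvOne k hk t.length w, pvOne k hk t.length h]
    simp [List.length_cons]

-- When n exceeds the bit length of x and k ≥ 2, x // k^n has saturated at 0 (x ≥ 0) or -1 (x < 0).
lemma pvCap (k n x : Int) (hk : 2 ≤ k) (hn : (PySem.Int.bitLength x : Int) < n) :
    PySem.Int.floordiv x (k ^ n.toNat) = if 0 ≤ x then 0 else -1 := by
  have hbl : PySem.Int.bitLength x < n.toNat := by omega
  have h1 : (x.natAbs : Int) < 2 ^ PySem.Int.bitLength x := by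
    exact_mod_cast PySem.Int.lt_two_pow_bitLength x
  have h2 : (2 : Int) ^ PySem.Int.bitLength x ≤ 2 ^ n.toNat :=
    pow_le_pow_right₀ (by norm_num) hbl.le
  have h3 : (2 : Int) ^ n.toNat ≤ k ^ n.toNat :=
    pow_le_pow_left₀ (by norm_num) hk n.toNat
  have habs : (x.natAbs : Int) < k ^ n.toNat := by omega
  have hd : (0 : Int) < k ^ n.toNat := pow_pos (by omega) _
  split_ifs with hx
  · rw [PySem.Int.floordiv_eq_iff_of_pos hd]
    constructor <;> omega
  · rw [PySem.Int.floordiv_eq_iff_of_pos hd]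
    constructor <;> omega

-- pvShrink equals x // k^n for k ≥ 1, n of any sign.
lemma pvShrink_eq (k n x : Int) (hk : 1 ≤ k) :
    pvShrink x k n = PySem.Int.floordiv x (k ^ n.toNat) := by
  unfold pvShrink
  by_cases hn : n ≤ 0
  · have h0 : n.toNat = 0 := by omega
    simp [hn, h0, PySem.Int.floordiv, Int.fdiv_one]
  · by_cases hk1 : k = 1
    · subst hk1
      simp [hn, PySem.Int.floordiv, Int.fdiv_one]
    · have hor : ¬(n ≤ 0 ∨ k = 1) := by tauto
      rw [if_neg hor]
      by_cases hb : (PySem.Int.bitLength x : Int) < n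
      · rw [if_pos hb, pvCap k n x (by omega) hb]
      · rw [if_neg hb]

-- A single pooling layer is x // k for any nonzero k (even negative).
lemma pvShrink_one (x k : Int) (hk : k ≠ 0) :
    pvShrink x k 1 = PySem.Int.floordiv x k := by
  unfold pvShrink
  by_cases hk1 : k = 1
  · subst hk1
    simp [PySem.Int.floordiv, Int.fdiv_one]
  · have hor : ¬((1 : Int) ≤ 0 ∨ k = 1) := by omega
    rw [if_neg hor]
    by_cases hb : (PySem.Int.bitLength x : Int) < 1
    · have hx0 : x = 0 := by
        by_contra hne
        have h1 := PySem.Int.lt_two_pow_bitLength x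
        have hbl : PySem.Int.bitLength x = 0 := by omega
        rw [hbl] at h1
        simp at h1
        omega
      subst hx0
      simp [PySem.Int.floordiv, Int.zero_fdiv]
    · rw [if_neg hb]
      norm_num

-- ===== VERDICT (by name: the statement is the Claim_ definition above) =====
theorem get_cnn_output_size_py_spec : Claim_equal_get_cnn_output_size_py := by
  intro w h_ c n k _ hpre
  have hp : n ≤ 0 ∨ 1 ≤ k ∨ (n = 1 ∧ k ≠ 0) := hpre
  unfold Spec_get_cnn_output_size_py get_cnn_output_size_py get_cnn_output_size_py_alt
  rcases hp with hn | hk | ⟨hn1, hk0⟩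
  · have ht : (n - 0).toNat = 0 := by omega
    rw [PySem.List.pyRange_one, ht]
    unfold pvShrink
    simp [hn]
  · rw [pvLoopEq k (by omega), PySem.List.length_pyRange_one,
        pvShrink_eq k n w hk, pvShrink_eq k n h_ hk]
    norm_num
  · subst hn1
    have h1 : PySem.List.pyRange 0 1 1 = [0] := by decide
    rw [h1, pvShrink_one w k hk0, pvShrink_one h_ k hk0]
    simp only [List.foldl]
    rw [pvStep k hk0 w, pvStep k hk0 h_]
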